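-- pv_equiv track=rewrite | github.com/KurtovicUM/robocall-classifier | filter.py | parse
-- ===== SOURCE A (Python) =====
-- import string
--
-- def parse(line, giveaways):
-- 	pauses = set(['um','uh','erm','eh'])
-- 	cleanline = ''
-- 	punctuationCount = 0
-- 	for c in line:
-- 		if c in string.punctuation:
-- 			punctuationCount += 1
-- 		else:
-- 			cleanline += c
--
-- 	cleanline = cleanline.split()
-- 	umCount , signalwordCount, wordCount = 0 , 0 , len(cleanline)
-- 	for word in cleanline:
-- 		if word in pauses:
-- 			umCount += 1
-- 		elif word in giveaways:
-- 			signalwordCount += 1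
--
-- 	return wordCount , signalwordCount , umCount , punctuationCount
-- ===== SOURCE B (Python) =====
-- import string
--
--
-- def parse(line, giveaways):
--     pauses = {'um', 'uh', 'erm', 'eh'}
--     wordCount = 0
--     signalwordCount = 0
--     umCount = 0
--     punctuationCount = 0
--     cur = []
--     for c in line:
--         if c in string.punctuation:
--             punctuationCount += 1
--         elif c.isspace():
--             if cur:
--                 word = ''.join(cur)
--                 wordCount += 1
--                 if word in pauses:
--                     umCount += 1
--                 elif word in giveaways:
--                     signalwordCount += 1
--                 cur = []
--         else:
--             cur.append(c)
--     if cur: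
--         word = ''.join(cur)
--         wordCount += 1
--         if word in pauses:
--             umCount += 1
--         elif word in giveaways:
--             signalwordCount += 1
--     return wordCount, signalwordCount, umCount, punctuationCount
-- ===== Notes on version B (the rewrite author's own statement) =====
-- stated objective: alternative
-- what changed: Replaces A's two staged passes (build a punctuation-free copy by repeated string concatenation, then split it and classify each word) by a single character-level tokenizer that counts punctuation, detects word boundaries and classifies each word the moment it ends, never materialising the cleaned string or the word list.
import Mathlib
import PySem

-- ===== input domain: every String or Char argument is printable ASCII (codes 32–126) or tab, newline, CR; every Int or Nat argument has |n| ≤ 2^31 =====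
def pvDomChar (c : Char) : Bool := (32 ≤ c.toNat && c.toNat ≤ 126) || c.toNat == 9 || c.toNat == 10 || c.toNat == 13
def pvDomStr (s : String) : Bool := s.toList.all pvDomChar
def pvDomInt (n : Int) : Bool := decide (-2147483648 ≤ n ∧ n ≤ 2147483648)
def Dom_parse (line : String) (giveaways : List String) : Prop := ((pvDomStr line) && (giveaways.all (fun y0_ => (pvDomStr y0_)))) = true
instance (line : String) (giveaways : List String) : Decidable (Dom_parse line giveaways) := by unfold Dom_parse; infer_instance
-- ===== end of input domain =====

-- B replaces A's two staged passes (build a punctuation-free copy, split it, classify the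
-- words) by a single character-level tokenizer that counts punctuation and classifies each
-- word as it ends, never materialising the cleaned string or the word list.

-- ===== PORT A =====
-- string.punctuation
def pvPunct : List Char := "!\"#$%&'()*+,-./:;<=>?@[\\]^_`{|}~".toList

def parse (line : String) (giveaways : List String) : Int × Int × Int × Int :=
  let pauses : PySem.Set String := PySem.Set.ofList ["um", "uh", "erm", "eh"]
  -- fused loop: accumulate the kept characters and count punctuation
  let st := line.toList.foldl
    (fun (st : List Char × Int) c =>
      if c ∈ pvPunct then (st.1, st.2 + 1) else (st.1 ++ [c], st.2)) ([], 0)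
  let punctuationCount := st.2
  let cleanline := PySem.Str.split₀ (String.ofList st.1)
  let wordCount : Int := cleanline.length
  let cnts := cleanline.foldl
    (fun (p : Int × Int) word =>
      if PySem.Set.contains pauses word then (p.1 + 1, p.2)
      else if word ∈ giveaways then (p.1, p.2 + 1)
      else p) (0, 0)
  (wordCount, cnts.2, cnts.1, punctuationCount)

-- ===== PORT B =====
def pvPausesB : PySem.Set String := PySem.Set.ofList ["um", "uh", "erm", "eh"]

-- flush: the word `cur` has ended — count it and classify it
def pvFlush (giveaways : List String) (cur : List Char) :
    Int × Int × Int × Int → Int × Int × Int × Int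
  | (w, s, u, p) =>
    let word := String.ofList cur
    if PySem.Set.contains pvPausesB word then (w + 1, s, u + 1, p)
    else if word ∈ giveaways then (w + 1, s + 1, u, p)
    else (w + 1, s, u, p)

-- the character-level tokenizer: `cur` is the word being built, the state the four counters
def pvScan (giveaways : List String) :
    List Char → List Char → Int × Int × Int × Int → Int × Int × Int × Int
  | [], cur, st => if cur.isEmpty then st else pvFlush giveaways cur st
  | c :: rest, cur, st =>
    if c ∈ pvPunct then
      pvScan giveaways rest cur (st.1, st.2.1, st.2.2.1, st.2.2.2 + 1)
    else if PySem.Chars.isspace c then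
      if cur.isEmpty then pvScan giveaways rest [] st
      else pvScan giveaways rest [] (pvFlush giveaways cur st)
    else pvScan giveaways rest (cur ++ [c]) st

def parse_alt (line : String) (giveaways : List String) : Int × Int × Int × Int :=
  pvScan giveaways line.toList [] (0, 0, 0, 0)

-- ===== PRECONDITION & SPEC =====
def Spec_parse (line : String) (giveaways : List String) (out : Int × Int × Int × Int) : Prop := out = parse_alt line giveaways
instance (line : String) (giveaways : List String) (out : Int × Int × Int × Int) : Decidable (Spec_parse line giveaways out) := by unfold Spec_parse; infer_instance

-- ===== CLAIM (what is proved, stated in full; the proofs are below) =====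
def Claim_equal_parse : Prop := ∀ (line : String) (giveaways : List String), Dom_parse line giveaways → Spec_parse line giveaways (parse line giveaways)

-- ===== LEMMAS AND PROOFS =====

-- componentwise equality for the 4-tuple of counters
theorem pv_mk4_ext {a1 a2 a3 a4 b1 b2 b3 b4 : Int}
    (h1 : a1 = b1) (h2 : a2 = b2) (h3 : a3 = b3) (h4 : a4 = b4) :
    ((a1, a2, a3, a4) : Int × Int × Int × Int) = (b1, b2, b3, b4) := by
  subst h1 h2 h3 h4; rfl

-- A's character loop computes (kept characters, punctuation count)
theorem pv_charLoop (cs : List Char) (acc : List Char) (n : Int) :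
    cs.foldl (fun (st : List Char × Int) c =>
        if c ∈ pvPunct then (st.1, st.2 + 1) else (st.1 ++ [c], st.2)) (acc, n)
      = (acc ++ cs.filter (fun c => !(c ∈ pvPunct)), n + (cs.countP (fun c => decide (c ∈ pvPunct)) : Int)) := by
  induction cs generalizing acc n with
  | nil => simp
  | cons c cs ih =>
    simp only [List.foldl_cons, List.countP_cons, List.filter_cons]
    by_cases h : c ∈ pvPunct
    · rw [if_pos h, ih]
      simp [h]
      push_cast; ring
    · rw [if_neg h, ih]
      simp [h]

-- A's word loop counts pauses and (non-pause) giveaway words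
theorem pv_wordLoopA (giveaways : List String) (ws : List String) (a b : Int) :
    ws.foldl (fun (p : Int × Int) word =>
        if PySem.Set.contains pvPausesB word then (p.1 + 1, p.2)
        else if word ∈ giveaways then (p.1, p.2 + 1)
        else p) (a, b)
      = (a + (ws.countP (fun w => PySem.Set.contains pvPausesB w) : Int),
         b + (ws.countP (fun w => !PySem.Set.contains pvPausesB w && decide (w ∈ giveaways)) : Int)) := by
  induction ws generalizing a b with
  | nil => simp
  | cons w ws ih =>
    simp only [List.foldl_cons, List.countP_cons]
    by_cases h1 : PySem.Set.contains pvPausesB w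
    · rw [if_pos h1, ih]
      simp only [h1, Bool.not_true, Bool.false_and, if_true, Prod.mk.injEq]
      constructor <;> push_cast <;> ring
    · rw [if_neg h1]
      rw [Bool.not_eq_true] at h1
      by_cases h2 : w ∈ giveaways
      · rw [if_pos h2, ih]
        simp only [h1, h2, Bool.not_false, Bool.true_and, decide_true, if_true,
          Prod.mk.injEq]
        constructor <;> push_cast <;> ring
      · rw [if_neg h2, ih]
        simp only [h1, h2, Bool.not_false, Bool.true_and, decide_false,
          Prod.mk.injEq]
        constructor <;> push_cast <;> ring

-- abbreviations for the two word predicates and the word list of a suffix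
def pvIsPau (wd : String) : Bool := PySem.Set.contains pvPausesB wd
def pvIsSig (giveaways : List String) (wd : String) : Bool :=
  !pvIsPau wd && decide (wd ∈ giveaways)
def pvWords (cs cur : List Char) : List String :=
  (PySem.Chars.split₀.go (cs.filter (fun c => !(c ∈ pvPunct))) cur.reverse []).map String.ofList

-- the split₀ worker is accumulator-homomorphic
theorem pv_go_acc (cs cur : List Char) (acc : List (List Char)) :
    PySem.Chars.split₀.go cs cur acc
      = acc.reverse ++ PySem.Chars.split₀.go cs cur [] := by
  induction cs generalizing cur acc with
  | nil =>
    by_cases h : cur.isEmpty <;> simp [PySem.Chars.split₀.go, h]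
  | cons c rest ih =>
    by_cases hs : PySem.Chars.isspace c
    · by_cases h : cur.isEmpty
      · simp only [PySem.Chars.split₀.go, hs, h, if_true]
        exact ih [] acc
      · simp only [PySem.Chars.split₀.go, hs, h, if_true, if_false]
        rw [ih [] (cur.reverse :: acc), ih [] [cur.reverse]]
        simp
    · simp only [PySem.Chars.split₀.go, hs, if_false]
      exact ih (c :: cur) acc

-- flushing a word bumps wordCount and the matching classification counter
theorem pv_flushCount (giveaways : List String) (cur : List Char) (w s u p : Int) :
    pvFlush giveaways cur (w, s, u, p)
      = (w + 1,
         s + (if pvIsSig giveaways (String.ofList cur) then (1 : Int) else 0),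
         u + (if pvIsPau (String.ofList cur) then (1 : Int) else 0),
         p) := by
  simp only [pvFlush, pvIsSig, pvIsPau]
  by_cases h1 : String.ofList cur ∈ pvPausesB
  · simp [h1]
  · by_cases h2 : String.ofList cur ∈ giveaways
    · simp [h1, h2]
    · simp [h1, h2]

-- the tokenizer computes the counters A derives from the word list of the filtered suffix
theorem pv_scan (giveaways : List String) (cs : List Char) (cur : List Char)
    (w s u p : Int) :
    pvScan giveaways cs cur (w, s, u, p)
      = (w + ((pvWords cs cur).length : Int),
         s + ((pvWords cs cur).countP (pvIsSig giveaways) : Int),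
         u + ((pvWords cs cur).countP pvIsPau : Int),
         p + (cs.countP (fun c => decide (c ∈ pvPunct)) : Int)) := by
  induction cs generalizing cur w s u p with
  | nil =>
    by_cases h : cur.isEmpty
    · simp [pvScan, pvWords, PySem.Chars.split₀.go, h]
    · have h' : cur.reverse.isEmpty = false := by simpa using h
      simp only [pvScan, h, if_false]
      rw [pv_flushCount]
      simp only [pvWords, List.filter_nil, PySem.Chars.split₀.go, h',
        List.reverse_nil, List.reverse_cons, List.nil_append, List.map_cons,
        List.map_nil, List.reverse_reverse, List.countP_cons, List.countP_nil,
        List.length_cons, List.length_nil, List.countP_nil]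
      refine pv_mk4_ext ?_ ?_ ?_ ?_ <;> simp
  | cons c rest ih =>
    by_cases hp : c ∈ pvPunct
    · simp only [pvScan, hp, if_true]
      rw [ih]
      have : pvWords (c :: rest) cur = pvWords rest cur := by
        simp [pvWords, List.filter_cons, hp]
      rw [this]
      simp only [List.countP_cons, hp, decide_true]
      refine pv_mk4_ext rfl rfl rfl ?_
      push_cast; ring
    · have hfc : (c :: rest).filter (fun c => !(c ∈ pvPunct))
          = c :: rest.filter (fun c => !(c ∈ pvPunct)) := by
        simp [List.filter_cons, hp]
      by_cases hs : PySem.Chars.isspace c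
      · by_cases h : cur.isEmpty
        · have hcur : cur = [] := by simpa [List.isEmpty_iff] using h
          simp only [pvScan, hp, hs, h, if_true, if_false]
          rw [ih]
          have : pvWords (c :: rest) cur = pvWords rest [] := by
            simp [pvWords, hfc, hcur, PySem.Chars.split₀.go, hs]
          rw [this]
          simp only [List.countP_cons, hp, decide_false]
          refine pv_mk4_ext rfl rfl rfl ?_
          push_cast; ring
        · have h' : cur.reverse.isEmpty = false := by simpa using h
          simp only [pvScan, hp, hs, h, Bool.false_eq_true, if_true, if_false]
          rw [pv_flushCount, ih]
          have hwords : pvWords (c :: rest) cur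
              = String.ofList cur :: pvWords rest [] := by
            simp [pvWords, hfc, PySem.Chars.split₀.go, hs, h']
            rw [pv_go_acc _ [] [cur]]
            simp
          rw [hwords]
          simp only [List.countP_cons, List.length_cons]
          refine pv_mk4_ext ?_ ?_ ?_ ?_ <;> simp <;> push_cast <;>
            (try split_ifs) <;> omega
      · rw [show pvScan giveaways (c :: rest) cur (w, s, u, p)
              = pvScan giveaways rest (cur ++ [c]) (w, s, u, p) from by
            simp [pvScan, hp, hs]]
        rw [ih]
        have : pvWords (c :: rest) cur = pvWords rest (cur ++ [c]) := by
          simp [pvWords, hfc, PySem.Chars.split₀.go, hs]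
        rw [this]
        simp only [List.countP_cons, hp, decide_false]
        refine pv_mk4_ext rfl rfl rfl ?_
        push_cast; ring

theorem parse_eq_parse_alt (line : String) (giveaways : List String) :
    parse line giveaways = parse_alt line giveaways := by
  unfold parse parse_alt
  rw [pv_charLoop, pv_scan]
  show _ = ((0 : Int) + _, (0 : Int) + _, (0 : Int) + _, (0 : Int) + _)
  simp only [zero_add, List.nil_append]
  have hsplit : PySem.Str.split₀
        (String.ofList (line.toList.filter (fun c => !(decide (c ∈ pvPunct)))))
      = pvWords line.toList [] := by
    simp [PySem.Str.split₀, pvWords, PySem.Chars.split₀]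
  have hpauses : PySem.Set.ofList ["um", "uh", "erm", "eh"] = pvPausesB := rfl
  rw [hpauses, hsplit, pv_wordLoopA]
  simp only [zero_add]
  rfl

-- ===== VERDICT (by name: the statement is the Claim_ definition above) =====
theorem parse_spec : Claim_equal_parse := by
  intro line giveaways _
  unfold Spec_parse
  exact parse_eq_parse_alt line giveaways
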